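-- pv_equiv track=rewrite | github.com/naszka/uncertain_builder | data/utils.py | number_ambiguity
-- ===== SOURCE A (Python) =====
-- number_strings = [
--     "two",
--     "three",
--     "four",
--     "five",
--     "six",
--     "seven",
--     "eight",
--     "nine",
--     "ten",
--     "2",
--     "3",
--     "4",
--     "5",
--     "6",
--     "7",
--     "8",
--     "9",
-- ]
--
-- def number_ambiguity(s):
--     def convert_plural(words):
--         out_words = []
--         found = False
--         # Iterate through the list of words
--         for i in range(len(words)):
--             # Check if the current word is a number
--             if (words[i] in number_strings) and not found:
--                 found = True
--                 continue
--             out_words.append(words[i])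
--         # Join the list of words back into a string and return it
--         return out_words
--
--     words = s.split()
--     words = convert_plural(words)
--
--     return " ".join(words)
-- ===== SOURCE B (Python) =====
-- NUMBER_WORDS = [
--     "two", "three", "four", "five", "six", "seven", "eight", "nine", "ten",
--     "2", "3", "4", "5", "6", "7", "8", "9",
-- ]
--
-- def number_ambiguity(s):
--     words = s.split()
--     # Invert the traversal: for each candidate number word, find its first
--     # occurrence in words; the minimum of those indices is the word to drop.
--     best = None
--     for t in NUMBER_WORDS:
--         try:
--             j = words.index(t)
--         except ValueError:
--             continue
--         if best is None or j < best:
--             best = j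
--     if best is None:
--         return " ".join(words)
--     return " ".join(words[:best] + words[best + 1:])
-- ===== Notes on version B (the rewrite author's own statement) =====
-- stated objective: alternative
-- what changed: B inverts the traversal: instead of scanning the words once with a found-flag accumulator, it loops over the 17 candidate number words, computes each candidate's first-occurrence index with list.index, takes the minimum such index, and splices that single position out of the word list.
import Mathlib
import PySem

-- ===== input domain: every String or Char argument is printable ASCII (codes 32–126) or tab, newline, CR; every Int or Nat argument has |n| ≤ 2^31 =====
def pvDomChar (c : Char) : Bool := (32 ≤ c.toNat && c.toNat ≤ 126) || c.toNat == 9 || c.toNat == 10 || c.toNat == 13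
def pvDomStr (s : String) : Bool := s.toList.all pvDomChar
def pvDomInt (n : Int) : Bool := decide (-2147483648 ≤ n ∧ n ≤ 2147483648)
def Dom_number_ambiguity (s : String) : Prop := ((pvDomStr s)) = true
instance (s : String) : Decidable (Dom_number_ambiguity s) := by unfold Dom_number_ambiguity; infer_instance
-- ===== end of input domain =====

-- B inverts the traversal: instead of A's one pass over the words with a found flag,
-- it loops over the candidate number words, takes the minimum first-occurrence index
-- (list.index) among them, and splices that position out; objective: alternative.

-- ===== PORT A =====
def number_strings : List String :=
  ["two", "three", "four", "five", "six", "seven", "eight", "nine", "ten",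
   "2", "3", "4", "5", "6", "7", "8", "9"]

-- A's inner loop: for each word, skip the first one found in number_strings, append the rest
def convert_plural (words : List String) : List String :=
  (words.foldl
    (fun (st : List String × Bool) w =>
      if w ∈ number_strings ∧ st.2 = false then (st.1, true)
      else (st.1 ++ [w], st.2))
    ([], false)).1

def number_ambiguity (s : String) : String :=
  PySem.Str.join " " (convert_plural (PySem.Str.split₀ s))

-- ===== PORT B =====
-- Source B's loop body: update best with candidate t's first occurrence (words.index)
def bestStep (words : List String) (best : Option Nat) (t : String) : Option Nat :=
  match PySem.List.index? words t with
  | none => best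
  | some j =>
    match best with
    | none => some j
    | some b => if j < b then some j else best

def number_ambiguity_alt (s : String) : String :=
  match number_strings.foldl (bestStep (PySem.Str.split₀ s)) none with
  | none => PySem.Str.join " " (PySem.Str.split₀ s)
  | some i => PySem.Str.join " " ((PySem.Str.split₀ s).take i ++ (PySem.Str.split₀ s).drop (i + 1))

-- ===== PRECONDITION & SPEC =====
def Spec_number_ambiguity (s : String) (out : String) : Prop := out = number_ambiguity_alt s
instance (s : String) (out : String) : Decidable (Spec_number_ambiguity s out) := by unfold Spec_number_ambiguity; infer_instance

-- ===== CLAIM (what is proved, stated in full; the proofs are below) =====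
def Claim_equal_number_ambiguity : Prop := ∀ (s : String), Dom_number_ambiguity s → Spec_number_ambiguity s (number_ambiguity s)

-- ===== LEMMAS AND PROOFS =====

-- min on Option Nat (none = +infinity)
def omin (a b : Option Nat) : Option Nat :=
  match a, b with
  | none, b => b
  | a, none => a
  | some x, some y => some (min x y)

theorem omin_none_right (a : Option Nat) : omin a none = a := by
  cases a <;> rfl

theorem omin_assoc (a b c : Option Nat) :
    omin (omin a b) c = omin a (omin b c) := by
  cases a <;> cases b <;> cases c <;> simp [omin, Nat.min_assoc]

theorem bestStep_eq_omin (words : List String) (b : Option Nat) (t : String) :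
    bestStep words b t = omin b (PySem.List.index? words t) := by
  unfold bestStep omin
  cases PySem.List.index? words t with
  | none => cases b <;> rfl
  | some j =>
    cases b with
    | none => rfl
    | some x =>
      by_cases h : j < x <;> simp only [h, if_true, if_false] <;>
        congr 1 <;> omega

theorem foldl_bestStep (words : List String) (cands : List String) (b : Option Nat) :
    cands.foldl (bestStep words) b =
      omin b (cands.foldl (bestStep words) none) := by
  induction cands generalizing b with
  | nil => simp [List.foldl_nil, omin_none_right]
  | cons t cs ih =>
    simp only [List.foldl_cons]
    rw [ih (bestStep words b t), ih (bestStep words none t),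
        bestStep_eq_omin, bestStep_eq_omin, omin_assoc]
    rfl

-- findIdx? of a disjunction is the min of the findIdx?s
theorem findIdx?_or (p q : String → Bool) (ws : List String) :
    ws.findIdx? (fun w => p w || q w) =
      omin (ws.findIdx? p) (ws.findIdx? q) := by
  induction ws with
  | nil => rfl
  | cons w ws ih =>
    simp only [List.findIdx?_cons, ih]
    by_cases hp : p w <;> by_cases hq : q w <;>
      simp only [hp, hq, Bool.true_or, Bool.false_or, Bool.or_false,
        cond_false] <;>
      cases ws.findIdx? p <;> cases ws.findIdx? q <;>
      first | (simp [omin, Option.map]; omega) | simp [omin, Option.map]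

-- index? is findIdx? of equality
theorem index?_eq_findIdx? (ws : List String) (t : String) :
    PySem.List.index? ws t = ws.findIdx? (fun w => w == t) := by
  rw [PySem.List.index?_eq_idxOf?]; rfl

-- B's fold over the candidates = the first index of a word in the candidate list
theorem foldl_bestStep_eq_findIdx? (ws : List String) (cands : List String) :
    cands.foldl (bestStep ws) none =
      ws.findIdx? (fun w => decide (w ∈ cands)) := by
  induction cands with
  | nil =>
    simp only [List.foldl_nil]
    symm
    rw [List.findIdx?_eq_none_iff]
    simp
  | cons t cs ih =>
    simp only [List.foldl_cons]
    rw [foldl_bestStep, ih, bestStep_eq_omin, index?_eq_findIdx?]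
    have h0 : omin (omin none (ws.findIdx? (fun w => w == t)))
        (ws.findIdx? (fun w => decide (w ∈ cs))) =
        omin (ws.findIdx? (fun w => w == t))
        (ws.findIdx? (fun w => decide (w ∈ cs))) := rfl
    rw [h0, ← findIdx?_or]
    congr 1
    funext w
    by_cases h : w = t <;> simp [h, List.mem_cons]

-- once the flag is set, A's loop appends every remaining word
theorem loop_found (ws : List String) (acc : List String) :
    (ws.foldl
      (fun (st : List String × Bool) w =>
        if w ∈ number_strings ∧ st.2 = false then (st.1, true)
        else (st.1 ++ [w], st.2))
      (acc, true)).1 = acc ++ ws := by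
  induction ws generalizing acc with
  | nil => simp
  | cons w ws ih => simp [List.foldl_cons, ih]

-- A's loop from an unset flag = splice at the first numeric word (if any)
theorem loop_unfound (ws : List String) (acc : List String) :
    (ws.foldl
      (fun (st : List String × Bool) w =>
        if w ∈ number_strings ∧ st.2 = false then (st.1, true)
        else (st.1 ++ [w], st.2))
      (acc, false)).1 =
    acc ++ (match ws.findIdx? (fun w => decide (w ∈ number_strings)) with
            | none => ws
            | some i => ws.take i ++ ws.drop (i + 1)) := by
  induction ws generalizing acc with
  | nil => simp
  | cons w ws ih =>
    by_cases h : w ∈ number_strings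
    · simp [List.foldl_cons, h, loop_found, List.findIdx?_cons]
    · simp only [List.foldl_cons, List.findIdx?_cons, h,
        and_true, if_false, decide_false, ih]
      cases hf : ws.findIdx? (fun w => decide (w ∈ number_strings)) with
      | none => simp
      | some i => simp [List.take_succ_cons, List.drop_succ_cons, List.append_assoc]

-- ===== VERDICT (by name: the statement is the Claim_ definition above) =====
theorem number_ambiguity_spec : Claim_equal_number_ambiguity := by
  intro s _
  unfold Spec_number_ambiguity number_ambiguity number_ambiguity_alt convert_plural
  rw [loop_unfound, foldl_bestStep_eq_findIdx?]
  simp only [List.nil_append]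
  cases hf : (PySem.Str.split₀ s).findIdx? (fun w => decide (w ∈ number_strings)) <;> simp
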